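-- pv_equiv track=rewrite | github.com/arsh0611/100_days_of_code | Q3MaximumProfitOnApp.py | mP
-- ===== SOURCE A (Python) =====
-- def mP(arr):
--   cost = 0
--   profit = 0
--   number = 1
--   pr=[]
--
--   while number != 0:
--     number  = 0
--     for i in range(0, len(arr)):
--       if cost<= arr[i]:
--         number = number+1
--     temp = number*cost
--
--
--     pr.append(temp)
--
--
--     cost = cost +1
--   pr.sort()
--
--   return(pr[len(pr)-1])
-- ===== SOURCE B (Python) =====
-- def mP(arr):
--     best = 0
--     desc = sorted(arr, reverse=True)
--     for i, v in enumerate(desc):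
--         p = v * (i + 1)
--         if p > best:
--             best = p
--     return best
-- ===== Notes on version B (the rewrite author's own statement) =====
-- stated objective: faster
-- what changed: Replaced the scan over every candidate price 0..max(arr)+1 (each with a full pass over arr) plus a final sort by a single descending sort and one pass taking max(0, value*(rank+1)).
import Mathlib
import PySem

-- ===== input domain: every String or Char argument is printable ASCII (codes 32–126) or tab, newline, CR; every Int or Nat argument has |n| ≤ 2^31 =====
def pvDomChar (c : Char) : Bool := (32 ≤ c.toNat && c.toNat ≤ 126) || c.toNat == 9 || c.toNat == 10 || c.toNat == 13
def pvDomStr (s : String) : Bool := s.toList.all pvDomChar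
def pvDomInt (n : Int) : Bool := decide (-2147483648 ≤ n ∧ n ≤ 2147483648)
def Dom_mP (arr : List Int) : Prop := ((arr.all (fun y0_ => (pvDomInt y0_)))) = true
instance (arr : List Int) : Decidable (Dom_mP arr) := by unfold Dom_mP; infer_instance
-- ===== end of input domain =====

-- B replaces A's scan over every candidate price 0..max(arr)+1 (each a full pass over arr, then a sort)
-- by one descending sort and a single pass maximising value*(rank+1); objective: faster.

-- ===== PORT A =====
-- the inner 'for i in range(0, len(arr)): if cost <= arr[i]: number += 1' loop
-- (pyGetD's default 0 is never read: i ranges over valid indices of arr)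
def mPcount (arr : List Int) (cost : Int) : Int :=
  (PySem.List.pyRange 0 (PySem.List.len arr)).foldl
    (fun number i => if cost ≤ PySem.List.pyGetD arr i 0 then number + 1 else number) 0

-- cited by mPloop's decreasing_by (and by the proofs below)
lemma mPcount_eq (arr : List Int) (cost : Int) :
    mPcount arr cost = (arr.countP (fun a => decide (cost ≤ a)) : Int) := by
  unfold mPcount
  rw [PySem.List.foldl_pyRange_pyGetD arr 0
    (fun number a => if cost ≤ a then number + 1 else number) 0 le_rfl]
  simp [PySem.List.foldl_ite_add_one (fun a : Int => cost ≤ a)]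

-- cited by mPloop's decreasing_by
lemma mPcount_le_max (arr : List Int) (cost : Int) (hc : mPcount arr cost ≠ 0) :
    cost ≤ arr.foldl max 0 := by
  rw [mPcount_eq] at hc
  have hpos : 0 < arr.countP (fun a => decide (cost ≤ a)) := by
    rcases Nat.eq_zero_or_pos (arr.countP (fun a => decide (cost ≤ a))) with h0 | h0
    · simp [h0] at hc
    · exact h0
  obtain ⟨a, ha, hca⟩ := List.countP_pos_iff.mp hpos
  have := (PySem.List.le_foldl_max arr 0).2 a ha
  have hca' : cost ≤ a := by simpa using hca
  omega

-- the 'while number != 0' loop of A, carrying (cost, pr, number); 'pr.append(temp)' is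
-- accumulated by cons and the list reversed once at the end of the loop (in mP below) —
-- the same list as Python's repeated append, in O(1) per append
def mPloop (arr : List Int) (cost : Int) (pr : List Int) (number : Int) : List Int :=
  if h : number ≠ 0 then
    let n := mPcount arr cost
    mPloop arr (cost + 1) ((n * cost) :: pr) n
  else pr
termination_by
  (if number = 0 then 0
   else (arr.foldl max 0 + 2 - cost).toNat + 1 + (if mPcount arr cost = 0 then 0 else 1))
decreasing_by
  by_cases hc : mPcount arr cost = 0
  · simp [hc, h]
  · have h1 := mPcount_le_max arr cost hc
    by_cases hc2 : mPcount arr (cost + 1) = 0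
    · simp only [hc, hc2, h, if_false, if_pos]
      omega
    · have h2 := mPcount_le_max arr (cost + 1) hc2
      simp only [hc, hc2, h, if_false]
      omega

def mP (arr : List Int) : Int :=
  let pr := (mPloop arr 0 [] 1).reverse
  -- pr.sort(): ported as the stable mergeSort, exact for Python's list.sort() on a list of ints;
  -- pr[len(pr)-1]: pyGetD's default 0 is never read — pr is nonempty
  -- (the loop body runs at least once, since number starts at 1)
  PySem.List.pyGetD (pr.mergeSort (fun a b => decide (a ≤ b))) (PySem.List.len pr - 1) 0

-- ===== PORT B =====
def mP_alt (arr : List Int) : Int :=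
  let desc := PySem.List.sorted arr (fun x => x) true
  (PySem.List.enumerate desc).foldl
    (fun best iv => let p := iv.2 * (iv.1 + 1); if p > best then p else best) 0

-- ===== PRECONDITION & SPEC =====
def Spec_mP (arr : List Int) (out : Int) : Prop := out = mP_alt arr
instance (arr : List Int) (out : Int) : Decidable (Spec_mP arr out) := by unfold Spec_mP; infer_instance

-- ===== CLAIM (what is proved, stated in full; the proofs are below) =====
def Claim_equal_mP : Prop := ∀ (arr : List Int), Dom_mP arr → Spec_mP arr (mP arr)

-- ===== LEMMAS AND PROOFS =====

lemma foldl_max_le {β : Type} (f : β → Int) (l : List β) (B : Int) :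
    ∀ init, init ≤ B → (∀ x ∈ l, f x ≤ B) →
      l.foldl (fun acc y => max acc (f y)) init ≤ B := by
  induction l with
  | nil => intro init h _; simpa using h
  | cons a t ih =>
    intro init h1 h2
    exact ih _ (max_le h1 (h2 a (List.mem_cons_self))) (fun x hx => h2 x (List.mem_cons_of_mem _ hx))

lemma mP_alt_eq_foldl_max (arr : List Int) :
    mP_alt arr = (PySem.List.enumerate (PySem.List.sorted arr (fun x => x) true)).foldl
      (fun acc iv => max acc (iv.2 * (iv.1 + 1))) 0 := by
  unfold mP_alt
  apply PySem.List.foldl_congr_mem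
  intro acc iv _
  dsimp only
  split <;> omega

lemma enum_mem_of (xs : List Int) :
    ∀ (start : Int) (k : Nat) (h : k < xs.length),
      (start + (k : Int), xs[k]) ∈ PySem.List.enumerate xs start := by
  induction xs with
  | nil => intro _ k h; simp at h
  | cons a t ih =>
    intro start k h
    cases k with
    | zero => simp [PySem.List.enumerate]
    | succ k =>
      have := ih (start + 1) k (by simpa using h)
      simp only [PySem.List.enumerate, List.mem_cons]
      right
      have harith : start + ((k : Int) + 1) = start + 1 + (k : Int) := by ring
      push_cast
      rw [harith]
      simpa using this

lemma enum_elim (xs : List Int) :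
    ∀ (start : Int) (iv : Int × Int), iv ∈ PySem.List.enumerate xs start →
      ∃ (k : Nat) (h : k < xs.length), iv.1 = start + (k : Int) ∧ iv.2 = xs[k] := by
  induction xs with
  | nil => intro _ iv h; simp [PySem.List.enumerate] at h
  | cons a t ih =>
    intro start iv h
    simp only [PySem.List.enumerate, List.mem_cons] at h
    rcases h with h | h
    · exact ⟨0, by simp, by simp [h]⟩
    · obtain ⟨k, hk, h1, h2⟩ := ih (start + 1) iv h
      exact ⟨k + 1, by simpa using hk, by push_cast; omega, by simpa using h2⟩

lemma mPloop_subset (arr : List Int) :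
    ∀ (cost : Int) (pr : List Int) (number : Int), ∀ y ∈ pr, y ∈ mPloop arr cost pr number := by
  intro cost pr number
  fun_induction mPloop arr cost pr number with
  | case1 cost pr number h n ih =>
    intro y hy
    exact ih y (List.mem_cons_of_mem _ hy)
  | case2 cost pr number h =>
    intro y hy
    simpa [h] using hy

lemma mPloop_le (arr : List Int) (B : Int)
    (hB : ∀ c : Int, 0 ≤ c → c * (arr.countP (fun a => decide (c ≤ a)) : Int) ≤ B) :
    ∀ (cost : Int) (pr : List Int) (number : Int), 0 ≤ cost → (∀ y ∈ pr, y ≤ B) →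
      ∀ y ∈ mPloop arr cost pr number, y ≤ B := by
  intro cost pr number
  fun_induction mPloop arr cost pr number with
  | case1 cost pr number h n ih =>
    intro hc hpr
    apply ih (by omega)
    intro y hy
    rcases List.mem_cons.mp hy with hy | hy
    · rw [hy]
      show mPcount arr cost * cost ≤ B
      rw [mPcount_eq, mul_comm]
      exact hB cost hc
    · exact hpr y hy
  | case2 cost pr number h =>
    intro _ hpr y hy
    exact hpr y (by simpa using hy)

lemma mPloop_mem (arr : List Int) :
    ∀ (k : Nat) (cost : Int) (pr : List Int) (number : Int), number ≠ 0 →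
      (∀ j : Nat, j < k → arr.countP (fun a => decide (cost + (j : Int) ≤ a)) ≠ 0) →
      (cost + (k : Int)) * (arr.countP (fun a => decide (cost + (k : Int) ≤ a)) : Int)
        ∈ mPloop arr cost pr number := by
  intro k
  induction k with
  | zero =>
    intro cost pr number hn _
    rw [mPloop]
    simp only [hn, ne_eq, not_false_iff, dif_pos]
    apply mPloop_subset
    simp [mPcount_eq, mul_comm]
  | succ k ih =>
    intro cost pr number hn hj
    rw [mPloop]
    simp only [hn, ne_eq, not_false_iff, dif_pos]
    have h0 : arr.countP (fun a => decide (cost + ((0 : Nat) : Int) ≤ a)) ≠ 0 := hj 0 (Nat.succ_pos k)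
    have hcnt : mPcount arr cost ≠ 0 := by
      rw [mPcount_eq]
      simp only [Nat.cast_zero, add_zero] at h0
      exact_mod_cast h0
    have hj' : ∀ j : Nat, j < k → arr.countP (fun a => decide (cost + 1 + (j : Int) ≤ a)) ≠ 0 := by
      intro j hjk
      have := hj (j + 1) (by omega)
      have harith : cost + ((j : Int) + 1) = cost + 1 + (j : Int) := by ring
      rw [Nat.cast_add, Nat.cast_one, harith] at this
      exact this
    have := ih (cost + 1) (mPcount arr cost * cost :: pr) (mPcount arr cost) hcnt hj'
    have harith : cost + 1 + (k : Int) = cost + ((k : Nat) + 1 : Nat) := by push_cast; ring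
    rw [harith] at this
    exact this

lemma sorted_last_spec (l : List Int) (hne : l ≠ []) :
    PySem.List.pyGetD (l.mergeSort (fun a b => decide (a ≤ b))) (PySem.List.len l - 1) 0 ∈ l ∧
    ∀ y ∈ l, y ≤ PySem.List.pyGetD (l.mergeSort (fun a b => decide (a ≤ b))) (PySem.List.len l - 1) 0 := by
  have hl : 0 < l.length := List.length_pos_iff.mpr hne
  have hlen : (l.mergeSort (fun a b => decide (a ≤ b))).length = l.length := List.length_mergeSort l
  have hpair : (l.mergeSort (fun a b => decide (a ≤ b))).Pairwise (fun a b => a ≤ b) := by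
    have := List.pairwise_mergeSort (le := fun a b : Int => decide (a ≤ b))
      (by intro a b c hab hbc; simp only [decide_eq_true_eq] at *; omega)
      (by intro a b; simp only [Bool.or_eq_true, decide_eq_true_eq]; omega) l
    simpa using this
  have hlenI : PySem.List.len l = (l.length : Int) := by simp [PySem.List.len]
  have h0 : (0 : Int) ≤ PySem.List.len l - 1 := by omega
  have h1 : PySem.List.len l - 1 < ((l.mergeSort (fun a b => decide (a ≤ b))).length : Int) := by
    rw [hlen]; omega
  rw [PySem.List.pyGetD_eq_getElem _ _ h0 h1]
  constructor
  · exact List.mem_mergeSort.mp (List.getElem_mem _)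
  · intro y hy
    have hy' : y ∈ l.mergeSort (fun a b => decide (a ≤ b)) := List.mem_mergeSort.mpr hy
    obtain ⟨p, hp, hpy⟩ := List.mem_iff_getElem.mp hy'
    rw [← hpy]
    rcases Nat.lt_or_ge p (PySem.List.len l - 1).toNat with hplt | hpge
    · exact List.pairwise_iff_getElem.mp hpair p _ hp (by omega) hplt
    · have : p = (PySem.List.len l - 1).toNat := by omega
      subst this
      exact le_refl _

lemma count_ge (s : List Int) (hp : s.Pairwise (fun a b => b ≤ a)) :
    ∀ (i : Nat) (h : i < s.length) (c : Int), c ≤ s[i] →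
      i + 1 ≤ s.countP (fun a => decide (c ≤ a)) := by
  induction s with
  | nil => intro i h; simp at h
  | cons a t ih =>
    intro i h c hc
    obtain ⟨ha, hp'⟩ := List.pairwise_cons.mp hp
    cases i with
    | zero =>
      simp only [List.getElem_cons_zero] at hc
      rw [List.countP_cons]
      simp [hc]
    | succ i =>
      simp only [List.getElem_cons_succ] at hc
      have h1 := ih hp' i (by simpa using h) c hc
      have h2 : c ≤ a := le_trans hc (ha _ (List.getElem_mem _))
      rw [List.countP_cons]
      simp [h2]
      omega

lemma prefix_ge (s : List Int) (hp : s.Pairwise (fun a b => b ≤ a)) (c : Int) :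
    ∀ (i : Nat) (h : i < s.length), i < s.countP (fun a => decide (c ≤ a)) → c ≤ s[i] := by
  induction s with
  | nil => intro i h; simp at h
  | cons a t ih =>
    intro i h hcnt
    obtain ⟨ha, hp'⟩ := List.pairwise_cons.mp hp
    by_cases hca : c ≤ a
    · cases i with
      | zero => simpa using hca
      | succ i =>
        simp only [List.getElem_cons_succ]
        rw [List.countP_cons] at hcnt
        simp [hca] at hcnt
        exact ih hp' i (by simpa using h) (by omega)
    · exfalso
      have hz : (a :: t).countP (fun a => decide (c ≤ a)) = 0 := by
        rw [List.countP_eq_zero]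
        intro x hx
        rcases List.mem_cons.mp hx with rfl | hx
        · simpa using hca
        · have := ha x hx
          simp only [decide_eq_true_eq]
          omega
      omega

theorem mP_spec_aux : ∀ (arr : List Int), mP arr = mP_alt arr := by
  intro arr
  have hperm : (PySem.List.sorted arr (fun x => x) true).Perm arr :=
    PySem.List.sorted_perm arr (fun x => x) true
  set desc := PySem.List.sorted arr (fun x => x) true with hdesc
  have hpair : desc.Pairwise (fun a b => b ≤ a) := by
    simpa using PySem.List.sorted_pairwise_rev arr (fun x => x)
  have hcntP : ∀ c : Int,
      desc.countP (fun a => decide (c ≤ a)) = arr.countP (fun a => decide (c ≤ a)) :=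
    fun c => hperm.countP_eq _
  have hzero : (0 : Int) ∈ (mPloop arr 0 [] 1).reverse := by
    have := mPloop_mem arr 0 0 [] 1 one_ne_zero
      (by intro j hj; exact absurd hj (Nat.not_lt_zero j))
    rw [List.mem_reverse]
    simpa using this
  have hne : (mPloop arr 0 [] 1).reverse ≠ [] := List.ne_nil_of_mem hzero
  obtain ⟨hAmem, hAub⟩ := sorted_last_spec (mPloop arr 0 [] 1).reverse hne
  have hmPdef : mP arr = PySem.List.pyGetD
      ((mPloop arr 0 [] 1).reverse.mergeSort (fun a b => decide (a ≤ b)))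
      (PySem.List.len (mPloop arr 0 [] 1).reverse - 1) 0 := rfl
  have hA0 : 0 ≤ mP arr := by rw [hmPdef]; exact hAub 0 hzero
  have hBfold := PySem.List.le_foldl_max_int (PySem.List.enumerate desc)
    (fun iv => iv.2 * (iv.1 + 1)) 0
  have hB0 : 0 ≤ mP_alt arr := by rw [mP_alt_eq_foldl_max]; exact hBfold.1
  have hBub : ∀ iv ∈ PySem.List.enumerate desc, iv.2 * (iv.1 + 1) ≤ mP_alt arr := by
    intro iv hiv
    rw [mP_alt_eq_foldl_max]
    exact hBfold.2 iv hiv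
  apply le_antisymm
  · -- A ≤ B: every entry cost*count appended by the while loop is at most B's maximum
    have hB : ∀ c : Int, 0 ≤ c →
        c * (arr.countP (fun a => decide (c ≤ a)) : Int) ≤ mP_alt arr := by
      intro c hc
      by_cases hz : arr.countP (fun a => decide (c ≤ a)) = 0
      · rw [hz]; simpa using hB0
      · have hmlen : arr.countP (fun a => decide (c ≤ a)) ≤ desc.length := by
          rw [← hcntP c]; exact List.countP_le_length
        have hmpos : 0 < arr.countP (fun a => decide (c ≤ a)) := Nat.pos_of_ne_zero hz
        set m := arr.countP (fun a => decide (c ≤ a)) with hm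
        have hi : m - 1 < desc.length := by omega
        have hge : c ≤ desc[m - 1] := prefix_ge desc hpair c (m - 1) hi (by rw [hcntP]; omega)
        have hb := hBub _ (enum_mem_of desc 0 (m - 1) hi)
        simp only at hb
        have hcast : ((0 : Int) + ((m - 1 : Nat) : Int)) + 1 = (m : Int) := by
          push_cast [hmpos]; omega
        rw [hcast] at hb
        calc c * (m : Int) ≤ desc[m - 1] * (m : Int) :=
              mul_le_mul_of_nonneg_right hge (by exact_mod_cast Nat.zero_le m)
          _ ≤ mP_alt arr := hb
    rw [hmPdef]
    exact mPloop_le arr (mP_alt arr) hB 0 [] 1 le_rfl (by simp) _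
      (List.mem_reverse.mp hAmem)
  · -- B ≤ A: each value*(rank+1) is at most some cost*count appended by the while loop
    rw [mP_alt_eq_foldl_max]
    apply foldl_max_le _ _ _ 0 hA0
    intro iv hiv
    obtain ⟨k, hk, h1, h2⟩ := enum_elim desc 0 iv hiv
    rw [h1, h2]
    by_cases hvn : 0 ≤ desc[k]
    · have hcnt1 : k + 1 ≤ desc.countP (fun a => decide (desc[k] ≤ a)) :=
        count_ge desc hpair k hk desc[k] le_rfl
      have hjne : ∀ j : Nat, j < desc[k].toNat →
          arr.countP (fun a => decide ((0 : Int) + (j : Int) ≤ a)) ≠ 0 := by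
        intro j hj
        rw [← hcntP]
        have hmemk : desc[k] ∈ desc := List.getElem_mem _
        have : 0 < desc.countP (fun a => decide ((0 : Int) + (j : Int) ≤ a)) := by
          apply List.countP_pos_iff.mpr
          exact ⟨desc[k], hmemk, by simp only [decide_eq_true_eq]; omega⟩
        omega
      have hmm := mPloop_mem arr desc[k].toNat 0 [] 1 one_ne_zero hjne
      have hv0 : (0 : Int) + ((desc[k].toNat : Nat) : Int) = desc[k] := by omega
      rw [hv0] at hmm
      have hle2 : desc[k] * ((k : Int) + 1) ≤
          desc[k] * (arr.countP (fun a => decide (desc[k] ≤ a)) : Int) := by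
        apply mul_le_mul_of_nonneg_left _ hvn
        rw [← hcntP]
        exact_mod_cast hcnt1
      calc desc[k] * (((0 : Int) + (k : Int)) + 1) = desc[k] * ((k : Int) + 1) := by ring
        _ ≤ desc[k] * (arr.countP (fun a => decide (desc[k] ≤ a)) : Int) := hle2
        _ ≤ mP arr := by rw [hmPdef]; exact hAub _ (List.mem_reverse.mpr hmm)
    · have hneg : desc[k] * (((0 : Int) + (k : Int)) + 1) ≤ 0 :=
        mul_nonpos_of_nonpos_of_nonneg (by omega) (by positivity)
      exact le_trans hneg hA0

-- ===== VERDICT (by name: the statement is the Claim_ definition above) =====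
theorem mP_spec : Claim_equal_mP := by
  intro arr _
  unfold Spec_mP
  exact mP_spec_aux arr
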